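-- pv_equiv track=rewrite | github.com/marzouki19/PawTech | ml/predict_knn.py | build_symptoms_text_from_neighbors
-- ===== SOURCE A (Python) =====
-- from typing import Any, Dict, List
--
-- def build_symptoms_text_from_neighbors(train_rows: List[Dict[str, Any]], indices: List[int]) -> str:
--     chunks: List[str] = []
--     for idx in indices:
--         raw = str(train_rows[int(idx)].get("symptoms", ""))
--         for part in raw.split(","):
--             clean = part.strip()
--             if clean and clean not in chunks:
--                 chunks.append(clean)
--             if len(chunks) >= 8:
--                 break
--         if len(chunks) >= 8:
--             break
--     return ", ".join(chunks)
-- ===== SOURCE B (Python) =====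
-- from typing import Any, Dict, List
--
-- def build_symptoms_text_from_neighbors(train_rows: List[Dict[str, Any]], indices: List[int]) -> str:
--     parts = [c for idx in indices
--                for c in (p.strip() for p in str(train_rows[int(idx)].get("symptoms", "")).split(","))
--                if c]
--     return ", ".join(sorted(set(parts), key=parts.index)[:8])
-- ===== Notes on version B (the rewrite author's own statement) =====
-- stated objective: alternative
-- what changed: Replaces A's incremental accumulate-with-membership-check and nested early-exit breaks by: gather all cleaned parts, deduplicate with a hash set, recover first-seen order by sorting the set by each part's first-occurrence index (parts.index), then take the first 8.
import Mathlib
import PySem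

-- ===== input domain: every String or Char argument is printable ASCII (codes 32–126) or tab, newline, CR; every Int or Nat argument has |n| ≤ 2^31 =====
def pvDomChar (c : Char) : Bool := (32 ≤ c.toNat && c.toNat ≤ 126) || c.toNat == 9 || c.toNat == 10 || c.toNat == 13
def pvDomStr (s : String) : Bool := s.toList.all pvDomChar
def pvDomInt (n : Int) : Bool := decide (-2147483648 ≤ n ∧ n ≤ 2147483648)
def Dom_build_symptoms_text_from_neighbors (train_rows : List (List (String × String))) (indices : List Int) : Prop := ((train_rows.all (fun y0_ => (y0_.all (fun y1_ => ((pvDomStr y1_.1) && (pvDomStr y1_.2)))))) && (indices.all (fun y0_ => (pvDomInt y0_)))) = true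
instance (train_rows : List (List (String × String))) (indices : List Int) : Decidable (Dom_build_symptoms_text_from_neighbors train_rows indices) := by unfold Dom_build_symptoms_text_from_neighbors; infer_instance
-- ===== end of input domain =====

-- B replaces A's incremental accumulate-with-membership-check and nested early-exit breaks by
-- gather → set-dedup → sort by first-occurrence index → take 8 (an alternative algorithm; same values wherever A returns).


-- ===== PORT A =====
-- raw = str(train_rows[int(idx)].get("symptoms", "")); total via getD [] — Pre_ excludes out-of-range idx
def pvRawA (train_rows : List (List (String × String))) (idx : Int) : String :=
  PySem.Dict.getD (PySem.Dict.mk ((PySem.List.pyGet? train_rows idx).getD [])) "symptoms" ""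

-- inner 'for part in raw.split(",")' with its break at len(chunks) >= 8
def pvInnerA : List String → List String → List String
  | [], chunks => chunks
  | p :: rest, chunks =>
    let clean := PySem.Str.strip p
    let chunks' := if clean ≠ "" ∧ clean ∉ chunks then chunks ++ [clean] else chunks
    if 8 ≤ chunks'.length then chunks' else pvInnerA rest chunks'

-- outer 'for idx in indices' with its break at len(chunks) >= 8; raw.split(",") with the
-- nonempty literal separator is split? with its getD (split? is none only for sep = "")
def pvOuterA (train_rows : List (List (String × String))) : List Int → List String → List String
  | [], chunks => chunks
  | idx :: rest, chunks =>
    let chunks' := pvInnerA ((PySem.Str.split? (pvRawA train_rows idx) ",").getD []) chunks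
    if 8 ≤ chunks'.length then chunks' else pvOuterA train_rows rest chunks'

def build_symptoms_text_from_neighbors (train_rows : List (List (String × String))) (indices : List Int) : String :=
  PySem.Str.join ", " (pvOuterA train_rows indices [])

-- ===== PORT B =====
-- parts = [c for idx in indices for c in (p.strip() for p in str(train_rows[int(idx)].get("symptoms","")).split(",")) if c]
def pvPartsB (train_rows : List (List (String × String))) (indices : List Int) : List String :=
  indices.flatMap (fun idx =>
    ((PySem.Str.split? (PySem.Dict.getD (PySem.Dict.mk ((PySem.List.pyGet? train_rows idx).getD [])) "symptoms" "") ",").getD []).filterMap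
      (fun p => if PySem.Str.strip p = "" then none else some (PySem.Str.strip p)))

-- ", ".join(sorted(set(parts), key=parts.index)[:8]) — every element of set(parts) is in parts, so
-- parts.index never raises and the getD 0 default is never used; the key is injective on the set,
-- so the sort's result does not depend on the set's iteration order
def build_symptoms_text_from_neighbors_alt (train_rows : List (List (String × String))) (indices : List Int) : String :=
  PySem.Str.join ", "
    (PySem.List.slice
      (PySem.List.sorted (PySem.Set.ofList (pvPartsB train_rows indices))
        (fun c => (((PySem.List.index? (pvPartsB train_rows indices) c).getD 0 : Nat) : Int)) false)
      none (some 8))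

-- ===== PRECONDITION & SPEC =====
-- Pre_ excludes exactly the inputs where Python A raises IndexError: some index outside [-len, len).
def Pre_build_symptoms_text_from_neighbors (train_rows : List (List (String × String))) (indices : List Int) : Prop :=
  ∀ i ∈ indices, PySem.Raise.InRange train_rows.length i
instance (train_rows : List (List (String × String))) (indices : List Int) : Decidable (Pre_build_symptoms_text_from_neighbors train_rows indices) := by unfold Pre_build_symptoms_text_from_neighbors; infer_instance

def pvWitness_build_symptoms_text_from_neighbors : (List (List (String × String))) × List Int :=
  ([[("symptoms", "fever, cough, fever")]], [0, -1])

def Spec_build_symptoms_text_from_neighbors (train_rows : List (List (String × String))) (indices : List Int) (out : String) : Prop := out = build_symptoms_text_from_neighbors_alt train_rows indices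
instance (train_rows : List (List (String × String))) (indices : List Int) (out : String) : Decidable (Spec_build_symptoms_text_from_neighbors train_rows indices out) := by unfold Spec_build_symptoms_text_from_neighbors; infer_instance

-- ===== CLAIM (what is proved, stated in full; the proofs are below) =====
def Claim_equal_build_symptoms_text_from_neighbors : Prop := ∀ (train_rows : List (List (String × String))) (indices : List Int), Dom_build_symptoms_text_from_neighbors train_rows indices → Pre_build_symptoms_text_from_neighbors train_rows indices → Spec_build_symptoms_text_from_neighbors train_rows indices (build_symptoms_text_from_neighbors train_rows indices)

-- ===== LEMMAS AND PROOFS =====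

-- the cleaned nonempty parts of one raw parts list (= the body of B's comprehension)
def pvCleanOf (ps : List String) : List String :=
  ps.filterMap (fun p => if PySem.Str.strip p = "" then none else some (PySem.Str.strip p))

-- A's inner loop over a concatenation: run the first block, stop if the break fired
theorem pvInnerA_append (xs ys c : List String) (h : c.length < 8) :
    pvInnerA (xs ++ ys) c =
      (if 8 ≤ (pvInnerA xs c).length then pvInnerA xs c else pvInnerA ys (pvInnerA xs c)) := by
  induction xs generalizing c with
  | nil => simp [pvInnerA, Nat.not_le.mpr h]
  | cons p xs ih =>
    simp only [List.cons_append, pvInnerA]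
    set clean := PySem.Str.strip p with hc
    by_cases hcnd : clean ≠ "" ∧ clean ∉ c
    · simp only [if_pos hcnd]
      by_cases h8 : 8 ≤ (c ++ [clean]).length
      · have h7 : 7 ≤ c.length := by simp at h8; omega
        simp [h7]
      · simp only [if_neg h8]; exact ih _ (Nat.not_le.mp h8)
    · simp only [if_neg hcnd, if_neg (Nat.not_le.mpr h)]
      exact ih _ h

-- A's two nested loops are one inner loop over the flattened raw parts
theorem pvOuterA_eq_inner_flat (train_rows : List (List (String × String)))
    (idxs : List Int) (c : List String) (h : c.length < 8) :
    pvOuterA train_rows idxs c =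
      pvInnerA (idxs.flatMap (fun idx => (PySem.Str.split? (pvRawA train_rows idx) ",").getD [])) c := by
  induction idxs generalizing c with
  | nil => simp [pvOuterA, pvInnerA]
  | cons idx rest ih =>
    simp only [pvOuterA, List.flatMap_cons]
    rw [pvInnerA_append _ _ _ h]
    by_cases h8 : 8 ≤ (pvInnerA ((PySem.Str.split? (pvRawA train_rows idx) ",").getD []) c).length
    · simp [h8]
    · simp only [if_neg h8]
      exact ih _ (Nat.not_le.mp h8)

-- Set.add only appends, so the accumulator is a prefix of the fold's result
theorem pvAdd_prefix (l c : List String) : c <+: l.foldl PySem.Set.add c := by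
  induction l generalizing c with
  | nil => simp
  | cons x l ih =>
    simp only [List.foldl_cons]
    refine List.IsPrefix.trans ?_ (ih (PySem.Set.add c x))
    by_cases hx : x ∈ c
    · simp [PySem.Set.add, PySem.Set.contains, hx]
    · simp [PySem.Set.add, PySem.Set.contains, hx]

-- A's inner loop (entered below the cap) is: take 8 of the ordered dedup-fold of the cleaned parts
theorem pvInnerA_eq_take_dedup (ps c : List String) (h : c.length < 8) :
    pvInnerA ps c = List.take 8 ((pvCleanOf ps).foldl PySem.Set.add c) := by
  induction ps generalizing c with
  | nil => simp [pvInnerA, pvCleanOf, List.take_of_length_le (Nat.le_of_lt h)]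
  | cons p ps ih =>
    by_cases he : PySem.Str.strip p = ""
    · have h1 : pvInnerA (p :: ps) c = pvInnerA ps c := by
        simp [pvInnerA, he, Nat.not_le.mpr h]
      have h2 : pvCleanOf (p :: ps) = pvCleanOf ps := by
        simp [pvCleanOf, he]
      rw [h1, h2]; exact ih c h
    · by_cases hm : PySem.Str.strip p ∈ c
      · have h1 : pvInnerA (p :: ps) c = pvInnerA ps c := by
          simp [pvInnerA, he, hm, Nat.not_le.mpr h]
        have h2 : (pvCleanOf (p :: ps)).foldl PySem.Set.add c = (pvCleanOf ps).foldl PySem.Set.add c := by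
          simp [pvCleanOf, he, PySem.Set.add, PySem.Set.contains, hm]
        rw [h2, h1]; exact ih c h
      · have h2 : (pvCleanOf (p :: ps)).foldl PySem.Set.add c
            = (pvCleanOf ps).foldl PySem.Set.add (c ++ [PySem.Str.strip p]) := by
          simp [pvCleanOf, he, PySem.Set.add, PySem.Set.contains, hm]
        rw [h2]
        by_cases h8 : 8 ≤ c.length + 1
        · have h1 : pvInnerA (p :: ps) c = c ++ [PySem.Str.strip p] := by
            have h7 : 7 ≤ c.length := by omega
            simp [pvInnerA, he, hm, h7]
          rw [h1]
          have hlen : (c ++ [PySem.Str.strip p]).length = 8 := by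
            simp; omega
          obtain ⟨t, ht⟩ := pvAdd_prefix (pvCleanOf ps) (c ++ [PySem.Str.strip p])
          rw [← ht, ← hlen, List.take_left]
        · have h1 : pvInnerA (p :: ps) c = pvInnerA ps (c ++ [PySem.Str.strip p]) := by
            have h7 : ¬ 7 ≤ c.length := by omega
            simp [pvInnerA, he, hm, h7]
          rw [h1]
          exact ih _ (by simp; omega)

-- cleaning after flattening = B's flattened comprehension
theorem pvCleanOf_flat (train_rows : List (List (String × String))) (idxs : List Int) :
    pvCleanOf (idxs.flatMap (fun idx => (PySem.Str.split? (pvRawA train_rows idx) ",").getD [])) =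
      pvPartsB train_rows idxs := by
  induction idxs with
  | nil => simp [pvCleanOf, pvPartsB]
  | cons i t ih =>
    simp only [List.flatMap_cons, pvCleanOf, pvPartsB, List.filterMap_append] at *
    rw [ih]; rfl

-- the Set.add fold from any accumulator: acc followed by the unseen part of the fold from []
theorem pvFoldlAdd_acc (l acc : List String) :
    l.foldl PySem.Set.add acc = acc ++ (l.foldl PySem.Set.add []).filter (fun y => decide (y ∉ acc)) := by
  induction l generalizing acc with
  | nil => simp
  | cons y l ih =>
    simp only [List.foldl_cons]
    rw [ih (PySem.Set.add acc y), ih (PySem.Set.add [] y)]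
    by_cases hy : y ∈ acc
    · have hadd0 : PySem.Set.add ([] : List String) y = [y] := by
        simp [PySem.Set.add, PySem.Set.contains]
      have haddy : PySem.Set.add acc y = acc := by
        simp [PySem.Set.add, PySem.Set.contains, hy]
      rw [hadd0, haddy]
      simp only [List.filter_append, List.append_right_inj]
      have hfy : List.filter (fun y_1 => decide (y_1 ∉ acc)) [y] = [] := by simp [hy]
      rw [hfy, List.nil_append, List.filter_filter]
      apply List.filter_congr
      intro a _
      by_cases ha : a ∈ acc
      · simp [ha]
      · have : a ≠ y := fun h => ha (h ▸ hy)
        simp [ha, this]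
    · have hadd0 : PySem.Set.add ([] : List String) y = [y] := by
        simp [PySem.Set.add, PySem.Set.contains]
      have haddy : PySem.Set.add acc y = acc ++ [y] := by
        simp [PySem.Set.add, PySem.Set.contains, hy]
      rw [hadd0, haddy]
      simp only [List.filter_append, List.append_assoc, List.append_right_inj]
      have h1 : List.filter (fun y_1 => decide (y_1 ∉ acc)) [y] = [y] := by simp [hy]
      rw [h1, List.filter_filter]
      simp only [List.cons_append, List.nil_append, List.cons.injEq, true_and]
      apply List.filter_congr
      intro a _
      by_cases ha : a ∈ acc
      · simp [ha]
      · by_cases hay : a = y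
        · simp [hay]
        · simp [ha, hay]

-- set(x::t) = x :: (elements of set(t) other than x)
theorem pvOfList_cons (x : String) (t : List String) :
    PySem.Set.ofList (x :: t) = x :: (PySem.Set.ofList t).filter (fun y => decide (y ≠ x)) := by
  have h0 : PySem.Set.ofList (x :: t) = t.foldl PySem.Set.add [x] := by
    rw [PySem.Set.ofList_eq_foldl]
    simp [PySem.Set.add, PySem.Set.contains]
  rw [h0, pvFoldlAdd_acc t [x], ← PySem.Set.ofList_eq_foldl]
  simp only [List.singleton_append, List.cons.injEq, true_and]
  apply List.filter_congr
  intro a _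
  simp

-- first-occurrence indices are strictly increasing along set(xs) (first-seen order)
theorem pvPairwise_idx (xs : List String) :
    (PySem.Set.ofList xs).Pairwise
      (fun a b => (((PySem.List.index? xs a).getD 0 : Nat) : Int) < (((PySem.List.index? xs b).getD 0 : Nat) : Int)) := by
  induction xs with
  | nil => simp [PySem.Set.ofList]
  | cons x t ih =>
    rw [pvOfList_cons]
    constructor
    · intro b hb
      have hbx : b ≠ x := by
        have := List.of_mem_filter hb
        simpa using this
      have hbt : b ∈ t := by
        have := List.mem_of_mem_filter hb
        rwa [PySem.Set.mem_ofList] at this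
      obtain ⟨k, hk⟩ := Option.isSome_iff_exists.mp ((PySem.List.index?_isSome_iff t b).mpr hbt)
      rw [PySem.List.index?_cons_self, PySem.List.index?_cons_of_ne t (Ne.symm hbx), hk]
      simp
    · have hsub : ((PySem.Set.ofList t).filter (fun y => decide (y ≠ x))).Pairwise
          (fun a b => (((PySem.List.index? t a).getD 0 : Nat) : Int) < (((PySem.List.index? t b).getD 0 : Nat) : Int)) :=
        ih.sublist List.filter_sublist
      refine hsub.imp_of_mem ?_
      intro a b ha hb hlt
      have hax : a ≠ x := by have := List.of_mem_filter ha; simpa using this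
      have hbx : b ≠ x := by have := List.of_mem_filter hb; simpa using this
      have hat : a ∈ t := by have := List.mem_of_mem_filter ha; rwa [PySem.Set.mem_ofList] at this
      have hbt : b ∈ t := by have := List.mem_of_mem_filter hb; rwa [PySem.Set.mem_ofList] at this
      obtain ⟨ka, hka⟩ := Option.isSome_iff_exists.mp ((PySem.List.index?_isSome_iff t a).mpr hat)
      obtain ⟨kb, hkb⟩ := Option.isSome_iff_exists.mp ((PySem.List.index?_isSome_iff t b).mpr hbt)
      rw [PySem.List.index?_cons_of_ne t (Ne.symm hax), PySem.List.index?_cons_of_ne t (Ne.symm hbx), hka, hkb]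
      rw [hka, hkb] at hlt
      simp at hlt ⊢
      omega

-- sorting set(parts) by first-occurrence index reproduces first-seen order
theorem pvSorted_ofList_idx (parts : List String) :
    PySem.List.sorted (PySem.Set.ofList parts)
        (fun c => (((PySem.List.index? parts c).getD 0 : Nat) : Int)) false =
      PySem.Set.ofList parts :=
  PySem.List.sorted_eq_of_perm_of_pairwise_lt _ _ _ (List.Perm.refl _) (pvPairwise_idx parts)

-- ===== VERDICT (by name: the statement is the Claim_ definition above) =====
theorem build_symptoms_text_from_neighbors_spec : Claim_equal_build_symptoms_text_from_neighbors := by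
  intro train_rows indices _ _
  unfold Spec_build_symptoms_text_from_neighbors
  unfold build_symptoms_text_from_neighbors build_symptoms_text_from_neighbors_alt
  rw [pvOuterA_eq_inner_flat _ _ _ (by simp),
      pvInnerA_eq_take_dedup _ _ (by simp),
      pvCleanOf_flat,
      pvSorted_ofList_idx,
      show (8 : Int) = ((8 : Nat) : Int) by norm_num,
      PySem.List.slice_to_natCast,
      PySem.Set.ofList_eq_foldl]
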